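-- pv_equiv track=rewrite | github.com/sisbell/agentic-reasoning-lattice | scripts/summarize.py | _extract_statement_and_contract
-- ===== SOURCE A (Python) =====
-- def _extract_statement_and_contract(md_text):
--     """Extract the header/statement and formal contract, skip the proof."""
--     lines = md_text.strip().split("\n")
--
--     # Header + first paragraph (the statement)
--     statement_lines = []
--     in_statement = True
--     for line in lines:
--         if in_statement:
--             statement_lines.append(line)
--             if line.strip() == "" and len(statement_lines) > 2:
--                 in_statement = False
--         # Look for formal contract
--         if line.strip().startswith("*Formal Contract:*"):
--             # Grab from here to end
--             idx = lines.index(line)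
--             contract = "\n".join(lines[idx:]).strip()
--             break
--     else:
--         contract = ""
--
--     statement = "\n".join(statement_lines).strip()
--     return statement, contract
-- ===== SOURCE B (Python) =====
-- def _extract_statement_and_contract(md_text):
--     """Two sequential passes: find the contract marker first, then collect the statement."""
--     lines = md_text.strip().split("\n")
--
--     # Pass 1: first line whose strip() starts with the marker -> contract from there on
--     marker_idx = len(lines)
--     contract = ""
--     for i, line in enumerate(lines):
--         if line.strip().startswith("*Formal Contract:*"):
--             marker_idx = i
--             contract = "\n".join(lines[i:]).strip()
--             break
--
--     # Pass 2: statement = lines up to the first blank after the first two lines,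
--     # never past the marker line (which A also appends before breaking)
--     statement_lines = []
--     for line in lines[:marker_idx + 1]:
--         statement_lines.append(line)
--         if line.strip() == "" and len(statement_lines) > 2:
--             break
--
--     return "\n".join(statement_lines).strip(), contract
-- ===== Notes on version B (the rewrite author's own statement) =====
-- stated objective: simpler
-- what changed: Replaces A's single interleaved loop (statement building, marker search with lines.index and for-else all in one pass) by two sequential passes: first find the marker line and take the contract from there, then collect the statement from the marker-capped prefix.
import Mathlib
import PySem

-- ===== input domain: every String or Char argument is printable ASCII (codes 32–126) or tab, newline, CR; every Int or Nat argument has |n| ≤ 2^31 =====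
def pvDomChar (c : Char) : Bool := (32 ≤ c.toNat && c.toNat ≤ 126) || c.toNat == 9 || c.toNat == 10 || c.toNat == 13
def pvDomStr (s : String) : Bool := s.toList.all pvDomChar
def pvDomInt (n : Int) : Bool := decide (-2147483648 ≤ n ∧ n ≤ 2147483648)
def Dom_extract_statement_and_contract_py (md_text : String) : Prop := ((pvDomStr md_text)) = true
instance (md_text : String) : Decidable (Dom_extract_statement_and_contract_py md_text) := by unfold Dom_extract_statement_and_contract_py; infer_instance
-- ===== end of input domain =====

-- B replaces A's single interleaved loop (statement building, marker search and for-else in one pass)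
-- by two sequential passes: find the contract marker first, then collect the statement capped at it (objective: simpler).

-- ===== PORT A =====
-- A's single for-loop: state = (statement_lines, in_statement); for-else gives contract = "" at the end.
def pvLoopA (lines : List String) : List String → List String → Bool → List String × String
  | [], stmt, _ => (stmt, "")
  | line :: rest, stmt, inst =>
    let stmt' := if inst then stmt ++ [line] else stmt
    let inst' := if inst && (PySem.Str.strip line == "" && decide (stmt'.length > 2)) then false else inst
    if PySem.Str.startswith (PySem.Str.strip line) "*Formal Contract:*" then
      let idx := (PySem.List.index? lines line).getD 0
      (stmt', PySem.Str.strip (PySem.Str.join "\n" (lines.drop idx)))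
    else
      pvLoopA lines rest stmt' inst'

def extract_statement_and_contract_py (md_text : String) : String × String :=
  let lines := (PySem.Str.split? (PySem.Str.strip md_text) "\n").getD []
  let r := pvLoopA lines lines [] true
  (PySem.Str.strip (PySem.Str.join "\n" r.1), r.2)

-- ===== PORT B =====
-- B pass 1: scan enumerate(lines) for the first marker line; contract from there to the end.
def pvFindB (lines : List String) : List (Int × String) → Nat × String
  | [] => (lines.length, "")
  | (i, line) :: rest =>
    if PySem.Str.startswith (PySem.Str.strip line) "*Formal Contract:*" then
      (i.toNat, PySem.Str.strip (PySem.Str.join "\n" (lines.drop i.toNat)))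
    else pvFindB lines rest

-- B pass 2: append lines, break on a blank line once more than 2 are collected.
def pvStmtB : List String → List String → List String
  | [], acc => acc
  | line :: rest, acc =>
    let acc' := acc ++ [line]
    if PySem.Str.strip line == "" && decide (acc'.length > 2) then acc' else pvStmtB rest acc'

def extract_statement_and_contract_py_alt (md_text : String) : String × String :=
  let lines := (PySem.Str.split? (PySem.Str.strip md_text) "\n").getD []
  let f := pvFindB lines (PySem.List.enumerate lines)
  (PySem.Str.strip (PySem.Str.join "\n" (pvStmtB (lines.take (f.1 + 1)) [])), f.2)

-- ===== PRECONDITION & SPEC =====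
def Spec_extract_statement_and_contract_py (md_text : String) (out : String × String) : Prop := out = extract_statement_and_contract_py_alt md_text
instance (md_text : String) (out : String × String) : Decidable (Spec_extract_statement_and_contract_py md_text out) := by unfold Spec_extract_statement_and_contract_py; infer_instance

-- ===== CLAIM (what is proved, stated in full; the proofs are below) =====
def Claim_equal_extract_statement_and_contract_py : Prop := ∀ (md_text : String), Dom_extract_statement_and_contract_py md_text → Spec_extract_statement_and_contract_py md_text (extract_statement_and_contract_py md_text)

-- ===== LEMMAS AND PROOFS =====

-- index of the first marker line within a list (its length if none); proof-only helper
def pvMIdx : List String → Nat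
  | [] => 0
  | line :: rest =>
    if PySem.Str.startswith (PySem.Str.strip line) "*Formal Contract:*" then 0 else pvMIdx rest + 1

-- Once in_statement is False, A never touches statement_lines again
lemma pvLoopA_false_fst (lines : List String) : ∀ rest stmt,
    (pvLoopA lines rest stmt false).1 = stmt := by
  intro rest
  induction rest with
  | nil => intro stmt; rfl
  | cons line rs ih =>
    intro stmt
    rw [show pvLoopA lines (line :: rs) stmt false
        = (if PySem.Str.startswith (PySem.Str.strip line) "*Formal Contract:*" then
            (stmt, PySem.Str.strip (PySem.Str.join "\n" (lines.drop ((PySem.List.index? lines line).getD 0))))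
          else pvLoopA lines rs stmt false) from rfl]
    split_ifs with h
    · rfl
    · exact ih stmt

-- A's statement part equals B's second pass over the marker-capped prefix
lemma pvLoopA_fst (lines : List String) : ∀ rest stmt,
    (pvLoopA lines rest stmt true).1 = pvStmtB (rest.take (pvMIdx rest + 1)) stmt := by
  intro rest
  induction rest with
  | nil => intro stmt; rfl
  | cons line rs ih =>
    intro stmt
    rw [show pvLoopA lines (line :: rs) stmt true
        = (if PySem.Str.startswith (PySem.Str.strip line) "*Formal Contract:*" then
            (stmt ++ [line], PySem.Str.strip (PySem.Str.join "\n" (lines.drop ((PySem.List.index? lines line).getD 0))))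
          else pvLoopA lines rs (stmt ++ [line])
            (if PySem.Str.strip line == "" && decide ((stmt ++ [line]).length > 2) then false else true)) from rfl,
       show pvMIdx (line :: rs)
        = (if PySem.Str.startswith (PySem.Str.strip line) "*Formal Contract:*" then 0 else pvMIdx rs + 1) from rfl]
    by_cases hm : PySem.Str.startswith (PySem.Str.strip line) "*Formal Contract:*" = true
    · rw [if_pos hm, if_pos hm]
      rw [show (0 : Nat) + 1 = 1 from rfl, show List.take 1 (line :: rs) = [line] from rfl]
      rw [show pvStmtB [line] stmt
          = (if PySem.Str.strip line == "" && decide ((stmt ++ [line]).length > 2) then stmt ++ [line]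
             else stmt ++ [line]) from rfl, ite_self]
    · rw [if_neg hm, if_neg hm, List.take_succ_cons]
      rw [show pvStmtB (line :: List.take (pvMIdx rs + 1) rs) stmt
          = (if PySem.Str.strip line == "" && decide ((stmt ++ [line]).length > 2) then stmt ++ [line]
             else pvStmtB (List.take (pvMIdx rs + 1) rs) (stmt ++ [line])) from rfl]
      by_cases hb : (PySem.Str.strip line == "" && decide ((stmt ++ [line]).length > 2)) = true
      · rw [if_pos hb, if_pos hb]
        exact pvLoopA_false_fst lines rs (stmt ++ [line])
      · rw [if_neg hb, if_neg hb]
        exact ih (stmt ++ [line])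

-- A's contract part equals B's first pass, for any suffix with a marker-free prefix before it
lemma pvLoopA_snd (lines : List String) : ∀ rest pre stmt inst,
    lines = pre ++ rest →
    (∀ l ∈ pre, PySem.Str.startswith (PySem.Str.strip l) "*Formal Contract:*" = false) →
    (pvLoopA lines rest stmt inst).2 = (pvFindB lines (PySem.List.enumerate rest (pre.length : Int))).2 := by
  intro rest
  induction rest with
  | nil => intro pre stmt inst _ _; rfl
  | cons line rs ih =>
    intro pre stmt inst hsplit hpre
    rw [show pvLoopA lines (line :: rs) stmt inst
        = (if PySem.Str.startswith (PySem.Str.strip line) "*Formal Contract:*" then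
            ((if inst then stmt ++ [line] else stmt),
             PySem.Str.strip (PySem.Str.join "\n" (lines.drop ((PySem.List.index? lines line).getD 0))))
          else pvLoopA lines rs (if inst then stmt ++ [line] else stmt)
            (if inst && (PySem.Str.strip line == ""
                && decide ((if inst then stmt ++ [line] else stmt).length > 2)) then false else inst)) from rfl,
       PySem.List.enumerate_cons,
       show pvFindB lines ((((pre.length : Int)), line) :: PySem.List.enumerate rs ((pre.length : Int) + 1))
        = (if PySem.Str.startswith (PySem.Str.strip line) "*Formal Contract:*" then
            (((pre.length : Int)).toNat,
             PySem.Str.strip (PySem.Str.join "\n" (lines.drop ((pre.length : Int)).toNat)))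
          else pvFindB lines (PySem.List.enumerate rs ((pre.length : Int) + 1))) from rfl]
    by_cases hm : PySem.Str.startswith (PySem.Str.strip line) "*Formal Contract:*" = true
    · rw [if_pos hm, if_pos hm]
      have hidx : PySem.List.index? lines line = some pre.length := by
        rw [PySem.List.index?_eq_some_iff]
        refine ⟨pre, rs, hsplit, rfl, ?_⟩
        intro hmem
        have := hpre line hmem
        rw [this] at hm
        exact Bool.false_ne_true hm
      rw [hidx, Option.getD_some, Int.toNat_natCast]
    · rw [if_neg hm, if_neg hm]
      have hmf : PySem.Str.startswith (PySem.Str.strip line) "*Formal Contract:*" = false := by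
        simpa using hm
      have h1 : lines = (pre ++ [line]) ++ rs := by simp [hsplit]
      have h2 : ∀ l ∈ pre ++ [line], PySem.Str.startswith (PySem.Str.strip l) "*Formal Contract:*" = false := by
        intro l hl
        rcases List.mem_append.mp hl with h | h
        · exact hpre l h
        · simp only [List.mem_singleton] at h; subst h; exact hmf
      have := ih (pre ++ [line]) (if inst then stmt ++ [line] else stmt)
        (if inst && (PySem.Str.strip line == ""
            && decide ((if inst then stmt ++ [line] else stmt).length > 2)) then false else inst) h1 h2
      rw [this]
      norm_num

-- B's first pass returns the index of the first marker line (lines.length if there is none)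
lemma pvFindB_fst (lines : List String) : ∀ rest (k : Nat),
    (pvFindB lines (PySem.List.enumerate rest (k : Int))).1 =
      (if pvMIdx rest = rest.length then lines.length else k + pvMIdx rest) := by
  intro rest
  induction rest with
  | nil => intro k; simp [pvFindB, pvMIdx, PySem.List.enumerate_nil]
  | cons line rs ih =>
    intro k
    rw [PySem.List.enumerate_cons,
       show pvFindB lines ((((k : Int)), line) :: PySem.List.enumerate rs ((k : Int) + 1))
        = (if PySem.Str.startswith (PySem.Str.strip line) "*Formal Contract:*" then
            (((k : Int)).toNat,
             PySem.Str.strip (PySem.Str.join "\n" (lines.drop ((k : Int)).toNat)))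
          else pvFindB lines (PySem.List.enumerate rs ((k : Int) + 1))) from rfl,
       show pvMIdx (line :: rs)
        = (if PySem.Str.startswith (PySem.Str.strip line) "*Formal Contract:*" then 0 else pvMIdx rs + 1) from rfl]
    by_cases hm : PySem.Str.startswith (PySem.Str.strip line) "*Formal Contract:*" = true
    · rw [if_pos hm, if_pos hm]
      have : ¬ ((0 : Nat) = rs.length + 1) := by omega
      rw [List.length_cons, if_neg this, Int.toNat_natCast]
      omega
    · rw [if_neg hm, if_neg hm,
          show ((k : Int) + 1) = (((k + 1 : Nat)) : Int) by push_cast; ring, ih (k + 1)]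
      rw [List.length_cons]
      split_ifs with h1 h2 h2 <;> omega

-- ===== VERDICT (by name: the statement is the Claim_ definition above) =====
theorem extract_statement_and_contract_py_spec : Claim_equal_extract_statement_and_contract_py := by
  intro md_text _
  unfold Spec_extract_statement_and_contract_py
  unfold extract_statement_and_contract_py extract_statement_and_contract_py_alt
  set lines := (PySem.Str.split? (PySem.Str.strip md_text) "\n").getD []
  have hsnd : (pvLoopA lines lines [] true).2 = (pvFindB lines (PySem.List.enumerate lines)).2 := by
    have := pvLoopA_snd lines lines [] [] true (by simp) (by simp)
    simpa using this
  have hfst : (pvLoopA lines lines [] true).1 =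
      pvStmtB (lines.take ((pvFindB lines (PySem.List.enumerate lines)).1 + 1)) [] := by
    rw [pvLoopA_fst lines lines []]
    have hf := pvFindB_fst lines lines 0
    rw [show PySem.List.enumerate lines = PySem.List.enumerate lines ((0 : Nat) : Int) by norm_num, hf]
    split_ifs with h
    · rw [h]
    · simp
  simp only [hsnd, hfst]
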